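-- pv_equiv track=rewrite | github.com/feadoor/gcj | 2018/qualification/go-gopher.py | get_orchard_size
-- ===== SOURCE A (Python) =====
-- def get_orchard_size(area):
--     for w in range(3, 15):
--         if w * w <= area < (w + 1) * (w + 1):
--             if w * (w + 1) < area:
--                 return (w, w + 2)
--             elif w * w < area:
--                 return (w, w + 1)
--             else: return (w, w)
-- ===== SOURCE B (Python) =====
-- def get_orchard_size(area):
--     if area < 9 or area >= 225:
--         return None
--     lo, hi = 3, 14
--     while lo < hi:
--         mid = (lo + hi + 1) // 2
--         if mid * mid <= area:
--             lo = mid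
--         else:
--             hi = mid - 1
--     w = lo
--     if w * (w + 1) < area:
--         return (w, w + 2)
--     elif w * w < area:
--         return (w, w + 1)
--     else:
--         return (w, w)
-- ===== Notes on version B (the rewrite author's own statement) =====
-- stated objective: alternative
-- what changed: Replaces the linear scan over range(3,15) for the bracketing width with a binary search for the integer square root on [3,14], then applies the same three-way branch.
-- outside the precondition, e.g. on get_orchard_size(5): A returns None, B returns None; on get_orchard_size(225): A returns None, B returns None
import Mathlib
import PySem

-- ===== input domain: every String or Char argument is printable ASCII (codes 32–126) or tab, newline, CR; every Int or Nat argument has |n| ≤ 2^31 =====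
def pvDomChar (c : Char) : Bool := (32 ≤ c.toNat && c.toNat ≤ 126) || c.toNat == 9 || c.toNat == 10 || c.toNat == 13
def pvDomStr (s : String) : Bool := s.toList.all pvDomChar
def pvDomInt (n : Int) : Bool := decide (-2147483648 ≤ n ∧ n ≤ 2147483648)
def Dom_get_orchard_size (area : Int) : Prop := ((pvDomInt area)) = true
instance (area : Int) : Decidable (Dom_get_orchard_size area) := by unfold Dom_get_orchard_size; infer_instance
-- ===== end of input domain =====

-- B replaces A's linear scan over range(3,15) with a binary search for the
-- bracketing width on [3,14] (same three-way branch afterwards); alternative, not faster.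


-- ===== PORT A =====
-- the for-loop with early return; [] case is Python's fall-through (returns None, excluded by Pre_)
def goA (area : Int) : List Int → Int × Int
  | [] => (0, 0)
  | w :: ws =>
    if w * w ≤ area ∧ area < (w + 1) * (w + 1) then
      if w * (w + 1) < area then (w, w + 2)
      else if w * w < area then (w, w + 1)
      else (w, w)
    else goA area ws

def get_orchard_size (area : Int) : Int × Int :=
  goA area (PySem.List.pyRange 3 15 1)

-- ===== PORT B =====
-- the while-loop; fuel 12 only makes the recursion total (hi - lo starts at 11 and shrinks each step)
def bsLoop (area : Int) : Nat → Int → Int → Int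
  | 0, lo, _ => lo
  | fuel + 1, lo, hi =>
    if lo < hi then
      let mid := PySem.Int.floordiv (lo + hi + 1) 2
      if mid * mid ≤ area then bsLoop area fuel mid hi
      else bsLoop area fuel lo (mid - 1)
    else lo

def get_orchard_size_alt (area : Int) : Int × Int :=
  if area < 9 ∨ 225 ≤ area then (0, 0)  -- Python B returns None here (outside Pre_)
  else
    let w := bsLoop area 12 3 14
    if w * (w + 1) < area then (w, w + 2)
    else if w * w < area then (w, w + 1)
    else (w, w)

-- ===== PRECONDITION & SPEC =====
-- Pre_ excludes exactly the inputs (area < 9 or area ≥ 225) on which Python A falls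
-- through its loop and returns None, which is not a value of the declared pair type.
def Pre_get_orchard_size (area : Int) : Prop := 9 ≤ area ∧ area < 225
instance (area : Int) : Decidable (Pre_get_orchard_size area) := by unfold Pre_get_orchard_size; infer_instance
def pvWitness_get_orchard_size : Int := (10)
def Spec_get_orchard_size (area : Int) (out : Int × Int) : Prop := out = get_orchard_size_alt area
instance (area : Int) (out : Int × Int) : Decidable (Spec_get_orchard_size area out) := by unfold Spec_get_orchard_size; infer_instance

-- ===== CLAIM (what is proved, stated in full; the proofs are below) =====
def Claim_equal_get_orchard_size : Prop := ∀ (area : Int), Dom_get_orchard_size area → Pre_get_orchard_size area → Spec_get_orchard_size area (get_orchard_size area)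

-- ===== LEMMAS AND PROOFS =====

-- ===== VERDICT (by name: the statement is the Claim_ definition above) =====
theorem get_orchard_size_spec : Claim_equal_get_orchard_size := by
  intro area _ hpre
  obtain ⟨h1, h2⟩ := hpre
  unfold Spec_get_orchard_size
  interval_cases area <;> decide
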